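-- pv_equiv track=rewrite | github.com/liangzid/DecisionTreeC4.5 | Node.py | devide_set
-- ===== SOURCE A (Python) =====
-- def devide_set(D, A):
--     '''根据特征A的值把数据集D分裂为多个子集'''
--     if (not isinstance(D, (set, list))):
--         return None
--     if (not type(A) is int):
--         return None
--     subset = {}
--     for t in D:
--         subset.setdefault(t[A], []).append(t)
--     return subset
-- ===== SOURCE B (Python) =====
-- def devide_set(D, A):
--     '''根据特征A的值把数据集D分裂为多个子集'''
--     if (not isinstance(D, (set, list))):
--         return None
--     if (not type(A) is int):
--         return None
--     keys = []
--     for t in D: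
--         v = t[A]
--         if v not in keys:
--             keys.append(v)
--     return {k: [t for t in D if t[A] == k] for k in keys}
-- ===== Notes on version B (the rewrite author's own statement) =====
-- stated objective: alternative
-- what changed: Replaces the single setdefault-accumulation pass with an index-then-scan strategy: one pass collects the distinct feature values in first-appearance order, then each group is rebuilt by a comprehension scanning D per key.
import Mathlib
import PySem

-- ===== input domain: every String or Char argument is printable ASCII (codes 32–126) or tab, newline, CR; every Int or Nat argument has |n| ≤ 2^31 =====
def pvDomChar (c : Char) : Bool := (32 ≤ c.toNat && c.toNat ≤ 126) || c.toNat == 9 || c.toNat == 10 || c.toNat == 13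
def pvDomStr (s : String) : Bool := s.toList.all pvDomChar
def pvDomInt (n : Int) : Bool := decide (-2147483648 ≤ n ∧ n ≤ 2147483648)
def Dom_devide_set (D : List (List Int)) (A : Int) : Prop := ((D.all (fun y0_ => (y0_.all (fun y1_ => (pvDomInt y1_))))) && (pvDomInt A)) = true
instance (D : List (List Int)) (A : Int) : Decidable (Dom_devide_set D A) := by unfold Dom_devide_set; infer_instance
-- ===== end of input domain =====

-- B trades A's single setdefault pass for an index-then-scan decomposition (same result); equivalence is about the return value.

-- ===== PORT A =====
-- subset.setdefault(t[A], []).append(t) ≡ d[t[A]] = d.get(t[A], []) + [t] ≡ Dict.modify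
def devide_set (D : List (List Int)) (A : Int) : List (Int × List (List Int)) :=
  (D.foldl (fun d t => PySem.Dict.modify d (PySem.List.pyGetD t A 0) [] (· ++ [t]))
    PySem.Dict.empty).items

-- ===== PORT B =====
def devide_set_alt (D : List (List Int)) (A : Int) : List (Int × List (List Int)) :=
  let keys : PySem.Set Int :=
    D.foldl (fun ks t => PySem.Set.add ks (PySem.List.pyGetD t A 0)) PySem.Set.empty
  keys.map (fun k => (k, D.filter (fun t => PySem.List.pyGetD t A 0 == k)))

-- ===== PRECONDITION & SPEC =====
-- Pre_ excludes exactly the inputs where t[A] raises IndexError in both Pythons.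
def Pre_devide_set (D : List (List Int)) (A : Int) : Prop :=
  ∀ t ∈ D, PySem.Raise.InRange t.length A
instance (D : List (List Int)) (A : Int) : Decidable (Pre_devide_set D A) := by
  unfold Pre_devide_set; infer_instance
def pvWitness_devide_set : List (List Int) × Int := ([[1, 2], [1, 3], [2, 4]], 0)

def Spec_devide_set (D : List (List Int)) (A : Int) (out : List (Int × List (List Int))) : Prop := out = devide_set_alt D A
instance (D : List (List Int)) (A : Int) (out : List (Int × List (List Int))) : Decidable (Spec_devide_set D A out) := by unfold Spec_devide_set; infer_instance

-- ===== CLAIM (what is proved, stated in full; the proofs are below) =====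
def Claim_equal_devide_set : Prop := ∀ (D : List (List Int)) (A : Int), Dom_devide_set D A → Pre_devide_set D A → Spec_devide_set D A (devide_set D A)

-- ===== LEMMAS AND PROOFS =====

-- A's accumulated dict, looked up at any key c, is exactly B's per-key scan of D.
theorem devide_set_getD (D : List (List Int)) (A : Int) (c : Int) :
    (D.foldl (fun d t => PySem.Dict.modify d (PySem.List.pyGetD t A 0) [] (· ++ [t]))
      PySem.Dict.empty).getD c []
      = D.filter (fun t => PySem.List.pyGetD t A 0 == c) := by
  have h := PySem.Dict.getD_foldl_modify_append
    (l := D.map (fun t => (PySem.List.pyGetD t A 0, t)))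
    (d := (PySem.Dict.empty : PySem.Dict Int (List (List Int)))) (c := c)
  rw [List.foldl_map] at h
  simpa [List.filter_map, Function.comp_def] using h

-- ===== VERDICT (by name: the statement is the Claim_ definition above) =====
theorem devide_set_spec : Claim_equal_devide_set := by
  intro D A _ _
  show devide_set D A = devide_set_alt D A
  unfold devide_set devide_set_alt
  set d := D.foldl (fun d t => PySem.Dict.modify d (PySem.List.pyGetD t A 0) [] (· ++ [t]))
    PySem.Dict.empty with hd
  have hnd : d.keys.Nodup := by
    rw [hd]
    exact PySem.Dict.nodup_keys_foldl_modify_key D (fun t => PySem.List.pyGetD t A 0) []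
      (fun d t => (· ++ [t])) PySem.Dict.empty (by simp [PySem.Dict.keys_empty])
  have hkeys : d.keys
      = D.foldl (fun ks t => PySem.Set.add ks (PySem.List.pyGetD t A 0)) PySem.Set.empty := by
    rw [hd, PySem.Dict.keys_foldl_modify_key, PySem.Dict.keys_empty,
      ← PySem.Set.update_map_eq_foldl_add]
    rfl
  rw [PySem.Dict.items_eq_map_keys d hnd [], hkeys]
  exact List.map_congr_left (fun k _ => by rw [hd, devide_set_getD])
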